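-- pv_equiv track=rewrite | github.com/Anel49/CIS112 | P5/solution/P5.py | deadliest_year
-- ===== SOURCE A (Python) =====
-- def deadliest_year(db):
--
--     hold = {}
--
--     # for each year's tuple in 'db', add index 2 (deaths) to the
--     # last
--     for y in db:
--         num = 0
--         for t in db[y]:
--             num += t[2]
--
--         hold.update({y: num})
--
--     # resets num for next loop
--     num = 0
--
--     # for each year, if the year's value is larger than 'num', assign
--     # 'deadliest_y' to the year and 'num' to the year's value
--     for year in hold:
--         if hold[year] > num:
--             deadliest_y = year
--             num = hold[year]
--
--     return deadliest_y
-- ===== SOURCE B (Python) =====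
-- def deadliest_year(db):
--     # single pass over the dict's items: no intermediate year->total dict
--     num = 0
--     for year, entries in db.items():
--         total = sum(e[2] for e in entries)
--         if total > num:
--             deadliest_y = year
--             num = total
--     return deadliest_y
-- ===== Notes on version B (the rewrite author's own statement) =====
-- stated objective: simpler
-- what changed: Replaces the two-phase design (build a year->total dict, then scan it by key lookup for the max) with one pass over db.items() that sums each year's deaths and keeps a running best.
import Mathlib
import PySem

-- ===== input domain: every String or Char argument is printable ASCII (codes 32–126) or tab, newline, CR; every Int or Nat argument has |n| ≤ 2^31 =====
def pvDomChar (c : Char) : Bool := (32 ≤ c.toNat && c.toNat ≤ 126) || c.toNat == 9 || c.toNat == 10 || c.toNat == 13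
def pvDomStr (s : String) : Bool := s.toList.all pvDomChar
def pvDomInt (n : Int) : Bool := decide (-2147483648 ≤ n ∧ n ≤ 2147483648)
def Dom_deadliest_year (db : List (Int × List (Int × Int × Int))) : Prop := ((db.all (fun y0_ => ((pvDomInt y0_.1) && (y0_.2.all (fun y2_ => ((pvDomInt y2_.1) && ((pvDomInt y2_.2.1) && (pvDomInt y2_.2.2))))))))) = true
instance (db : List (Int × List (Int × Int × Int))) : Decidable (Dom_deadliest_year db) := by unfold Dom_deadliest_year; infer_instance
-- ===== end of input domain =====

-- B replaces A's two-phase design (build a year->total dict, then scan it by key lookup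
-- for the maximum) with a single pass over the items keeping a running best: simpler.


-- ===== PORT A =====
-- A, step for step: first loop builds hold = {y: sum of t[2] for t in db[y]} (db[y] is a
-- dict lookup, i.e. first match in the association list); second loop scans hold's keys,
-- looking each value up again, with strict '>' against num = 0.  'deadliest_y' is unbound
-- until the first positive total, so Python raises UnboundLocalError when every total ≤ 0:
-- the port carries it as an Option and those inputs are excluded by Pre_ (.getD 0 is junk there).
def deadliest_year (db : List (Int × List (Int × Int × Int))) : Int :=
  let hold : PySem.Dict Int Int :=
    (db.map (·.1)).foldl
      (fun h y =>
        let num := ((PySem.Dict.mk db).getD y []).foldl (fun n t => n + t.2.2) 0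
        h.insert y num)
      PySem.Dict.empty
  let r : Int × Option Int :=
    hold.keys.foldl
      (fun st year =>
        if hold.getD year 0 > st.1 then (hold.getD year 0, some year) else st)
      (0, none)
  r.2.getD 0

-- ===== PORT B =====
-- B, step for step: one pass over db's items; total = sum of e[2]; running best with '>'.
-- 'deadliest_y' is likewise unbound while num = 0 never beaten: Option, junk .getD 0 outside Pre_.
def deadliest_year_alt (db : List (Int × List (Int × Int × Int))) : Int :=
  let r : Option Int × Int :=
    db.foldl
      (fun st p =>
        let total := (p.2.map (fun e => e.2.2)).sum
        if total > st.2 then (some p.1, total) else st)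
      (none, 0)
  r.1.getD 0

-- ===== PRECONDITION & SPEC =====
-- Pre_ excludes (a) lists with duplicate keys, which do not represent a Python dict (the
-- argument's type in Python), and (b) inputs whose death totals are all ≤ 0, on which both
-- Pythons raise UnboundLocalError ('deadliest_y' is never assigned).
def Pre_deadliest_year (db : List (Int × List (Int × Int × Int))) : Prop :=
  (db.map (·.1)).Nodup ∧ ∃ p ∈ db, 0 < (p.2.map (fun e => e.2.2)).sum
instance (db : List (Int × List (Int × Int × Int))) : Decidable (Pre_deadliest_year db) := by
  unfold Pre_deadliest_year; infer_instance
def pvWitness_deadliest_year : (List (Int × List (Int × Int × Int))) :=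
  [(2000, [(1, 2, 3), (4, 5, 6)]), (1999, [(0, 0, 2)])]
def Spec_deadliest_year (db : List (Int × List (Int × Int × Int))) (out : Int) : Prop := out = deadliest_year_alt db
instance (db : List (Int × List (Int × Int × Int))) (out : Int) : Decidable (Spec_deadliest_year db out) := by unfold Spec_deadliest_year; infer_instance

-- ===== CLAIM (what is proved, stated in full; the proofs are below) =====
def Claim_equal_deadliest_year : Prop := ∀ (db : List (Int × List (Int × Int × Int))), Dom_deadliest_year db → Pre_deadliest_year db → Spec_deadliest_year db (deadliest_year db)

-- ===== LEMMAS AND PROOFS =====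

-- A's per-year inner loop computes the same total as B's sum.
theorem pv_inner_sum (l : List (Int × Int × Int)) :
    l.foldl (fun n t => n + t.2.2) 0 = (l.map (fun e => e.2.2)).sum := by
  simpa using PySem.List.foldl_add l (fun t => t.2.2) 0

-- With nodup keys, A's hold has exactly db's keys with B's totals as values.
theorem pv_hold_items (db : List (Int × List (Int × Int × Int)))
    (h : (db.map (·.1)).Nodup) :
    ((db.map (·.1)).foldl
      (fun h y =>
        let num := ((PySem.Dict.mk db).getD y []).foldl (fun n t => n + t.2.2) 0
        h.insert y num)
      PySem.Dict.empty).items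
      = db.map (fun p => (p.1, (p.2.map (fun e => e.2.2)).sum)) := by
  show (List.foldl
      (fun h y => h.insert y (((PySem.Dict.mk db).getD y []).foldl (fun n t => n + t.2.2) 0))
      PySem.Dict.empty (db.map (·.1))).items
      = db.map (fun p => (p.1, (p.2.map (fun e => e.2.2)).sum))
  rw [PySem.Dict.items_foldl_insert_fresh (db.map (·.1)) (fun y => y)
        (fun y => ((PySem.Dict.mk db).getD y []).foldl (fun n t => n + t.2.2) 0)
        PySem.Dict.empty
        (by intro a _; simp [PySem.Dict.empty])
        (by simpa using h)]
  have hkeys : (PySem.Dict.mk db).keys.Nodup := by simpa [PySem.Dict.keys] using h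
  simp only [PySem.Dict.empty, List.nil_append, List.map_map]
  rw [List.map_congr_left]
  intro p hp
  have hget : (PySem.Dict.mk db).getD p.1 [] = p.2 :=
    PySem.Dict.getD_of_mem_items (PySem.Dict.mk db) (by simpa using hp) hkeys []
  simp [Function.comp, hget, pv_inner_sum]

-- The second scan of A, run over a list of (key, value) pairs whose lookups agree with
-- the pair's own value, equals B's single-pass fold with the state components swapped.
theorem pv_scan (items : List (Int × Int)) (n : Int) (b : Option Int) :
    (items.foldl (fun st p => if p.2 > st.1 then (p.2, some p.1) else st) (n, b)).2
      = (items.foldl (fun st p => if p.2 > st.2 then (some p.1, p.2) else st) (b, n)).1 := by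
  induction items generalizing n b with
  | nil => rfl
  | cons p rest ih =>
      simp only [List.foldl_cons]
      by_cases hc : p.2 > n
      · simp [hc, ih]
      · simp [hc, ih]

-- ===== VERDICT (by name: the statement is the Claim_ definition above) =====
theorem deadliest_year_spec : Claim_equal_deadliest_year := by
  intro db _hdom hpre
  obtain ⟨hnd, -⟩ := hpre
  show deadliest_year db = deadliest_year_alt db
  unfold deadliest_year deadliest_year_alt
  set hold := (db.map (·.1)).foldl
      (fun h y =>
        let num := ((PySem.Dict.mk db).getD y []).foldl (fun n t => n + t.2.2) 0
        h.insert y num)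
      PySem.Dict.empty with hhold
  have hitems : hold.items = db.map (fun p => (p.1, (p.2.map (fun e => e.2.2)).sum)) :=
    pv_hold_items db hnd
  have hkeysnd : hold.keys.Nodup := by
    simp only [PySem.Dict.keys, hitems, List.map_map]
    simpa [Function.comp] using hnd
  -- replace the lookups hold.getD year 0 inside the scan by the item's own value
  have hscan :
      hold.keys.foldl
          (fun st year =>
            if hold.getD year 0 > st.1 then (hold.getD year 0, some year) else st)
          ((0 : Int), (none : Option Int))
        = hold.items.foldl
            (fun st p => if p.2 > st.1 then (p.2, some p.1) else st)
            ((0 : Int), (none : Option Int)) := by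
    simp only [PySem.Dict.keys, List.foldl_map]
    refine PySem.List.foldl_congr_mem _ _ _ _ ?_
    intro acc p hp
    have : hold.getD p.1 0 = p.2 := PySem.Dict.getD_of_mem_items hold (by simpa using hp) hkeysnd 0
    simp [this]
  show (hold.keys.foldl
      (fun st year =>
        if hold.getD year 0 > st.1 then (hold.getD year 0, some year) else st)
      ((0 : Int), (none : Option Int))).2.getD 0
    = (db.foldl
        (fun st p =>
          if (p.2.map (fun e => e.2.2)).sum > st.2
          then (some p.1, (p.2.map (fun e => e.2.2)).sum) else st)
        ((none : Option Int), (0 : Int))).1.getD 0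
  rw [hscan, hitems, pv_scan]
  simp only [List.foldl_map]
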